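-- pv_equiv track=rewrite | github.com/hihiroo/Game | NemoNemoLogic.py | make_ans_col
-- ===== SOURCE A (Python) =====
-- def make_ans_col(board,size):
--     ans_col = [[' ']*size for x in range(len(board))]
--     for y in range(len(board)):
--         cnt = 0
--         lv = size-1
--         for x in range(len(board)-1,-1,-1):
--             if board[y][x] == '*':
--                 cnt += 1
--             else:
--                 if cnt > 0:
--                     ans_col[y][lv] = str(cnt)
--                     lv -= 1
--                     cnt = 0
--         if cnt > 0:
--             ans_col[y][lv] = str(cnt)
--     return ans_col
-- ===== SOURCE B (Python) =====
-- def make_ans_col(board, size):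
--     n = len(board)
--     ans = []
--     for y in range(n):
--         runs = []
--         cnt = 0
--         for x in range(n):
--             if board[y][x] == '*':
--                 cnt += 1
--             elif cnt:
--                 runs.append(str(cnt))
--                 cnt = 0
--         if cnt:
--             runs.append(str(cnt))
--         ans.append([' '] * (size - len(runs)) + runs)
--     return ans
-- ===== Notes on version B (the rewrite author's own statement) =====
-- stated objective: alternative
-- what changed: A scans each row right-to-left while writing counts in place into a preallocated size-length row at a descending cursor; B scans left-to-right, collects the run lengths into a list, then builds each output row in one step as a space padding concatenated with that list.
import Mathlib
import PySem

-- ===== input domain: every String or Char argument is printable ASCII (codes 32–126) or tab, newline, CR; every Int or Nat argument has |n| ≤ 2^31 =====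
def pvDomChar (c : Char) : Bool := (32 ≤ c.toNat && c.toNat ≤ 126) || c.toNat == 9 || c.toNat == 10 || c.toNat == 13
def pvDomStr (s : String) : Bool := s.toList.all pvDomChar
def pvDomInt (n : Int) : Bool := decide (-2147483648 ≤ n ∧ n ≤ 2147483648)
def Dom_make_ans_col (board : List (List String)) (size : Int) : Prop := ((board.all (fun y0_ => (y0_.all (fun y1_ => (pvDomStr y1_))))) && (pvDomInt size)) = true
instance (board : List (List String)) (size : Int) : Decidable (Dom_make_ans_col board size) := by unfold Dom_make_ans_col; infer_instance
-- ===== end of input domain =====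

-- B restructures A's per-row pass: instead of a right-to-left scan writing counts in place
-- at a descending cursor of a preallocated row, B collects run lengths left-to-right and
-- builds each output row in one step as space padding ++ runs (objective: alternative).

-- ===== PORT A =====
def make_ans_col (board : List (List String)) (size : Int) : List (List String) :=
  -- ans_col = [[' ']*size for x in range(len(board))]
  let ans0 : List (List String) :=
    (PySem.List.pyRange 0 (PySem.List.len board) 1).map (fun _ => PySem.List.pyRepeat [" "] size)
  -- for y in range(len(board)): …  (in-place writes to ans_col[y] become read row / write back)
  (PySem.List.pyRange 0 (PySem.List.len board) 1).foldl
    (fun ans y =>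
      let row := PySem.List.pyGetD board y []   -- board[y]; in range under Pre_
      let st :=
        (PySem.List.pyRange (PySem.List.len board - 1) (-1) (-1)).foldl
          (fun (st : Int × Int × List String) x =>
            if PySem.List.pyGetD row x "" = "*" then (st.1 + 1, st.2.1, st.2.2)
            else if 0 < st.1 then
              (0, st.2.1 - 1, PySem.List.pySetD st.2.2 st.2.1 (PySem.Int.toStr st.1))
            else st)
          (0, size - 1, PySem.List.pyGetD ans y [])
      PySem.List.pySetD ans y
        (if 0 < st.1 then PySem.List.pySetD st.2.2 st.2.1 (PySem.Int.toStr st.1) else st.2.2))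
    ans0

-- ===== PORT B =====
def make_ans_col_alt (board : List (List String)) (size : Int) : List (List String) :=
  let n := PySem.List.len board
  (PySem.List.pyRange 0 n 1).foldl
    (fun ans y =>
      let row := PySem.List.pyGetD board y []   -- board[y]; in range under Pre_
      let rc :=
        (PySem.List.pyRange 0 n 1).foldl
          (fun (rc : List String × Int) x =>
            if PySem.List.pyGetD row x "" = "*" then (rc.1, rc.2 + 1)
            else if rc.2 ≠ 0 then (rc.1 ++ [PySem.Int.toStr rc.2], 0)
            else rc)
          ([], 0)
      let runs := if rc.2 ≠ 0 then rc.1 ++ [PySem.Int.toStr rc.2] else rc.1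
      ans ++ [PySem.List.pyRepeat [" "] (size - PySem.List.len runs) ++ runs])
    []

-- ===== PRECONDITION & SPEC =====
-- closed-form run counter used only by Pre_: number of positions holding "*" whose
-- predecessor (or the left border) is not "*"
def pvNRuns (cells : List String) : Nat :=
  (cells.zip ("" :: cells)).countP (fun p => p.1 == "*" && p.2 != "*")

-- Pre_ excludes the inputs on which A raises (a row shorter than len(board) gives IndexError
-- on board[y][x]; a run-count overflow past index -size gives IndexError on ans_col[y][lv])
-- and the degenerate boards where a row's hint list does not fit in size cells: no width-size
-- hint row exists for such inputs, so neither A's wrapped-around placement nor B's over-long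
-- row is a value anyone would specify.
def Pre_make_ans_col (board : List (List String)) (size : Int) : Prop :=
  (∀ row ∈ board, board.length ≤ row.length) ∧
  (∀ row ∈ board, pvNRuns (row.take board.length) = 0 ∨ (pvNRuns (row.take board.length) : Int) ≤ size)
instance (board : List (List String)) (size : Int) : Decidable (Pre_make_ans_col board size) := by
  unfold Pre_make_ans_col; infer_instance

def pvWitness_make_ans_col : List (List String) × Int := ([["*", "*"], ["x", "*"]], 2)

def Spec_make_ans_col (board : List (List String)) (size : Int) (out : List (List String)) : Prop :=
  out = make_ans_col_alt board size
instance (board : List (List String)) (size : Int) (out : List (List String)) : Decidable (Spec_make_ans_col board size out) := by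
  unfold Spec_make_ans_col; infer_instance

-- ===== CLAIM (what is proved, stated in full; the proofs are below) =====
def Claim_equal_make_ans_col : Prop := ∀ (board : List (List String)) (size : Int), Dom_make_ans_col board size → Pre_make_ans_col board size → Spec_make_ans_col board size (make_ans_col board size)

-- ===== LEMMAS AND PROOFS =====

def runsAux : List String → Int → List Int
  | [], c => if 0 < c then [c] else []
  | h :: t, c =>
    if h = "*" then runsAux t (c + 1)
    else if 0 < c then c :: runsAux t 0 else runsAux t c

def placeRuns : List Int → Int → List String → List String
  | [], _, r => r
  | k :: ks, lv, r => placeRuns ks (lv - 1) (PySem.List.pySetD r lv (PySem.Int.toStr k))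

def aStep (st : Int × Int × List String) (s : String) : Int × Int × List String :=
  if s = "*" then (st.1 + 1, st.2.1, st.2.2)
  else if 0 < st.1 then (0, st.2.1 - 1, PySem.List.pySetD st.2.2 st.2.1 (PySem.Int.toStr st.1))
  else st

def bStep (rc : List String × Int) (s : String) : List String × Int :=
  if s = "*" then (rc.1, rc.2 + 1)
  else if rc.2 ≠ 0 then (rc.1 ++ [PySem.Int.toStr rc.2], 0)
  else rc

def aFlush (st : Int × Int × List String) : List String :=
  if 0 < st.1 then PySem.List.pySetD st.2.2 st.2.1 (PySem.Int.toStr st.1) else st.2.2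

def bFlush (rc : List String × Int) : List String :=
  if rc.2 ≠ 0 then rc.1 ++ [PySem.Int.toStr rc.2] else rc.1

lemma bFold_eq (c : List String) : ∀ (runs : List String) (cnt : Int), 0 ≤ cnt →
    bFlush (c.foldl bStep (runs, cnt)) = runs ++ (runsAux c cnt).map PySem.Int.toStr := by
  induction c with
  | nil =>
    intro runs cnt h0
    by_cases hc : 0 < cnt
    · have hne : cnt ≠ 0 := by omega
      simp [bFlush, runsAux, hc, hne]
    · have hz : cnt = 0 := by omega
      simp [bFlush, runsAux, hc, hz]
  | cons h t ih =>
    intro runs cnt h0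
    rw [List.foldl_cons]
    by_cases hs : h = "*"
    · rw [show bStep (runs, cnt) h = (runs, cnt + 1) by simp [bStep, hs]]
      rw [ih runs (cnt + 1) (by omega)]
      simp [runsAux, hs]
    · by_cases hc : 0 < cnt
      · have hne : cnt ≠ 0 := by omega
        rw [show bStep (runs, cnt) h = (runs ++ [PySem.Int.toStr cnt], 0) by simp [bStep, hs, hne]]
        rw [ih (runs ++ [PySem.Int.toStr cnt]) 0 (by omega)]
        simp [runsAux, hs, hc]
      · have hz : cnt = 0 := by omega
        rw [show bStep (runs, cnt) h = (runs, cnt) by simp [bStep, hs, hz]]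
        rw [ih runs cnt h0]
        simp [runsAux, hs, hc]

lemma aFold_eq (c : List String) : ∀ (cnt lv : Int) (r : List String),
    aFlush (c.foldl aStep (cnt, lv, r)) = placeRuns (runsAux c cnt) lv r := by
  induction c with
  | nil =>
    intro cnt lv r
    by_cases hc : 0 < cnt <;> simp [aFlush, runsAux, placeRuns, hc]
  | cons h t ih =>
    intro cnt lv r
    rw [List.foldl_cons]
    by_cases hs : h = "*"
    · rw [show aStep (cnt, lv, r) h = (cnt + 1, lv, r) by simp [aStep, hs]]
      rw [ih (cnt + 1) lv r]
      simp [runsAux, hs]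
    · by_cases hc : 0 < cnt
      · rw [show aStep (cnt, lv, r) h
             = (0, lv - 1, PySem.List.pySetD r lv (PySem.Int.toStr cnt)) by simp [aStep, hs, hc]]
        rw [ih 0 (lv - 1) _]
        simp [runsAux, hs, hc, placeRuns]
      · rw [show aStep (cnt, lv, r) h = (cnt, lv, r) by simp [aStep, hs, hc]]
        rw [ih cnt lv r]
        simp [runsAux, hs, hc]

lemma runsAux_replicate_star (k : Nat) : ∀ (c : Int),
    runsAux (List.replicate k "*") c = if 0 < c + k then [c + (k : Int)] else [] := by
  induction k with
  | zero => intro c; simp [runsAux]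
  | succ k ih =>
    intro c
    rw [List.replicate_succ]
    rw [show runsAux ("*" :: List.replicate k "*") c = runsAux (List.replicate k "*") (c + 1) by
      simp [runsAux]]
    rw [ih (c + 1)]
    have h1 : c + 1 + (k : Int) = c + ((k + 1 : Nat) : Int) := by push_cast; ring
    by_cases hp : 0 < c + 1 + (k : Int)
    · rw [if_pos hp, if_pos (by push_cast at *; omega), h1]
    · rw [if_neg hp, if_neg (by push_cast at *; omega)]

lemma runsAux_append_sep (hd : String) (d : List String) (hh : hd ≠ "*") :
    ∀ (a : List String) (c : Int), 0 ≤ c →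
    runsAux (a ++ hd :: d) c = runsAux a c ++ runsAux d 0 := by
  intro a
  induction a with
  | nil =>
    intro c h0
    by_cases hc : 0 < c
    · simp [runsAux, hh, hc]
    · have hz : c = 0 := by omega
      simp [runsAux, hh, hc, hz]
  | cons x a ih =>
    intro c h0
    by_cases hx : x = "*"
    · simp only [List.cons_append]
      rw [show runsAux (x :: (a ++ hd :: d)) c = runsAux (a ++ hd :: d) (c + 1) by simp [runsAux, hx]]
      rw [ih (c + 1) (by omega)]
      simp [runsAux, hx]
    · by_cases hc : 0 < c
      · simp only [List.cons_append]
        rw [show runsAux (x :: (a ++ hd :: d)) c = c :: runsAux (a ++ hd :: d) 0 by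
          simp [runsAux, hx, hc]]
        rw [ih 0 (by omega)]
        simp [runsAux, hx, hc]
      · simp only [List.cons_append]
        rw [show runsAux (x :: (a ++ hd :: d)) c = runsAux (a ++ hd :: d) c by
          simp [runsAux, hx, hc]]
        rw [ih c h0]
        simp [runsAux, hx, hc]

lemma runsAux_reverse_aux (c : List String) : ∀ (k : Nat),
    runsAux (c.reverse ++ List.replicate k "*") 0 = (runsAux c (k : Int)).reverse := by
  induction c with
  | nil =>
    intro k
    rw [List.reverse_nil, List.nil_append, runsAux_replicate_star k 0]
    simp only [runsAux, zero_add]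
    split_ifs <;> simp
  | cons h t ih =>
    intro k
    rw [List.reverse_cons]
    by_cases hs : h = "*"
    · subst hs
      rw [List.append_assoc, show ["*"] ++ List.replicate k "*" = List.replicate (k+1) "*" by
        simp [List.replicate_succ]]
      rw [ih (k + 1)]
      rw [show runsAux ("*" :: t) (k : Int) = runsAux t ((k : Int) + 1) by simp [runsAux]]
      norm_num
    · rw [List.append_assoc, List.singleton_append]
      rw [runsAux_append_sep h (List.replicate k "*") hs t.reverse 0 (by omega)]
      have h0 := ih 0
      simp only [List.replicate_zero, List.append_nil, Nat.cast_zero] at h0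
      rw [h0, runsAux_replicate_star k 0]
      by_cases hk : 0 < (k : Int)
      · rw [show runsAux (h :: t) (k : Int) = (k : Int) :: runsAux t 0 by
          simp only [runsAux, if_neg hs, if_pos hk]]
        have hk' : 0 < k := by exact_mod_cast hk
        simp [hk, hk']
      · have hz : (k : Int) = 0 := by omega
        rw [show runsAux (h :: t) (k : Int) = runsAux t (k : Int) by
          simp only [runsAux, if_neg hs, if_neg hk]]
        simp [hk, hz]

lemma placeRuns_eq (ks : List Int) : ∀ (pre suf : List String), ks.length ≤ pre.length →
    placeRuns ks ((pre.length : Int) - 1) (pre ++ suf)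
    = pre.take (pre.length - ks.length) ++ ks.reverse.map PySem.Int.toStr ++ suf := by
  induction ks with
  | nil => intro pre suf _; simp [placeRuns]
  | cons k ks ih =>
    intro pre suf hlen
    have hpre : 0 < pre.length := by simp at hlen; omega
    rw [placeRuns]
    have hidx : ((pre.length : Int) - 1) = ((pre.length - 1 : Nat) : Int) := by omega
    rw [hidx, PySem.List.pySetD_natCast]
    have hset : (pre ++ suf).set (pre.length - 1) (PySem.Int.toStr k)
        = pre.take (pre.length - 1) ++ (PySem.Int.toStr k :: suf) := by
      rw [List.set_append_left _ _ (by omega), List.set_eq_take_append_cons_drop,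
          if_pos (by omega), List.drop_eq_nil_of_le (by omega)]
      simp
    rw [hset]
    have htk : (pre.take (pre.length - 1)).length = pre.length - 1 := by
      rw [List.length_take]; omega
    have hih := ih (pre.take (pre.length - 1)) (PySem.Int.toStr k :: suf)
      (by rw [htk]; simp at hlen ⊢; omega)
    rw [htk] at hih
    rw [hih, List.take_take]
    have : pre.length - 1 - ks.length = pre.length - (k :: ks).length := by simp; omega
    rw [show min (pre.length - 1 - ks.length) (pre.length - 1) = pre.length - (k :: ks).length by
      simp at hlen; omega]
    simp

lemma runsAux_length_nruns_aux (c : List String) : ∀ (prev : String) (cnt : Int), 0 ≤ cnt →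
    (prev = "*" ↔ 0 < cnt) →
    (runsAux c cnt).length
    = (c.zip (prev :: c)).countP (fun p => p.1 == "*" && p.2 != "*")
      + (if 0 < cnt then 1 else 0) := by
  induction c with
  | nil =>
    intro prev cnt h0 hiff
    by_cases hc : 0 < cnt <;> simp [runsAux, hc]
  | cons h t ih =>
    intro prev cnt h0 hiff
    rw [List.zip_cons_cons, List.countP_cons]
    by_cases hs : h = "*"
    · rw [show runsAux (h :: t) cnt = runsAux t (cnt + 1) by simp [runsAux, hs]]
      rw [ih h (cnt + 1) (by omega) (by constructor <;> intro <;> first | omega | exact hs)]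
      by_cases hc : 0 < cnt
      · have hp : prev = "*" := hiff.mpr hc
        simp [hs, hp, hc]
        omega
      · have hp : prev ≠ "*" := fun hp => hc (hiff.mp hp)
        simp [hs, hp, hc]
        omega
    · rw [show runsAux (h :: t) cnt
          = if 0 < cnt then cnt :: runsAux t 0 else runsAux t cnt by simp [runsAux, hs]]
      by_cases hc : 0 < cnt
      · rw [if_pos hc]
        have hih := ih h 0 (by omega) (by simp [hs])
        simp only [List.length_cons, hih]
        simp [hs, hc]
      · have hz : cnt = 0 := by omega
        rw [if_neg hc, hz]
        have hih := ih h 0 (by omega) (by simp [hs])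
        rw [hih]
        simp [hs, hc, hz]

lemma pyGetD_take (row : List String) (m : Nat) (hm : m ≤ row.length) (j : Int)
    (h0 : 0 ≤ j) (hj : j < (m : Int)) (d : String) :
    PySem.List.pyGetD row j d = PySem.List.pyGetD (row.take m) j d := by
  rw [PySem.List.pyGetD_of_nonneg _ _ h0, PySem.List.pyGetD_of_nonneg _ _ h0,
      List.getD_eq_getElem?_getD, List.getD_eq_getElem?_getD]
  have : j.toNat < m := by omega
  simp [List.getElem?_take, this]

lemma pyGetD_append_len {α : Type} (M : List α) (a : α) (l : List α) (d : α) :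
    PySem.List.pyGetD (M ++ a :: l) (M.length : Int) d = a := by
  rw [PySem.List.pyGetD_natCast, List.getD_eq_getElem?_getD,
      List.getElem?_append_right (le_refl _)]
  simp

lemma pySetD_append_len {α : Type} (M : List α) (a : α) (l : List α) (v : α) :
    PySem.List.pySetD (M ++ a :: l) (M.length : Int) v = M ++ v :: l := by
  rw [PySem.List.pySetD_natCast, List.set_append_right _ _ (le_refl _)]
  simp

lemma foldA_set (G : Int → List String → List String) (d : List String) :
    ∀ (m : Nat) (ans : List (List String)), m ≤ ans.length →
    (PySem.List.pyRange 0 (m : Int) 1).foldl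
      (fun a y => PySem.List.pySetD a y (G y (PySem.List.pyGetD a y d))) ans
    = (PySem.List.pyRange 0 (m : Int) 1).map (fun y => G y (PySem.List.pyGetD ans y d))
      ++ ans.drop m := by
  intro m
  induction m with
  | zero => intro ans _; simp [PySem.List.pyRange_one_eq_nil]
  | succ m ih =>
    intro ans hm
    rw [show ((m + 1 : Nat) : Int) = (m : Int) + 1 by push_cast; ring]
    rw [PySem.List.pyRange_one_succ_right (by positivity), List.foldl_append, List.foldl_cons,
        List.foldl_nil, List.map_append]
    rw [ih ans (by omega)]
    have hansm : ans.drop m = ans[m] :: ans.drop (m + 1) := List.drop_eq_getElem_cons (by omega)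
    rw [hansm]
    set M := (PySem.List.pyRange 0 (m : Int) 1).map (fun y => G y (PySem.List.pyGetD ans y d))
      with hM
    have hMlen : M.length = m := by simp [hM, PySem.List.length_pyRange_one]
    have hg : PySem.List.pyGetD (M ++ ans[m] :: ans.drop (m + 1)) ((m : Nat) : Int) d = ans[m] := by
      rw [show ((m : Nat) : Int) = (M.length : Int) by rw [hMlen]]
      exact pyGetD_append_len M _ _ d
    rw [hg]
    have hs : PySem.List.pySetD (M ++ ans[m] :: ans.drop (m + 1)) ((m : Nat) : Int)
        (G ((m : Nat) : Int) ans[m]) = M ++ G ((m : Nat) : Int) ans[m] :: ans.drop (m + 1) := by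
      rw [show ((m : Nat) : Int) = (M.length : Int) by rw [hMlen]]
      exact pySetD_append_len M _ _ _
    rw [hs]
    have hga : PySem.List.pyGetD ans ((m : Nat) : Int) d = ans[m] := by
      rw [PySem.List.pyGetD_natCast, List.getD_eq_getElem?_getD,
          List.getElem?_eq_getElem (by omega : m < ans.length)]
      rfl
    simp [hga]

def aRow (n : Nat) (size : Int) (row : List String) : List String :=
  let st :=
    (PySem.List.pyRange ((n : Int) - 1) (-1) (-1)).foldl
      (fun (st : Int × Int × List String) x =>
        if PySem.List.pyGetD row x "" = "*" then (st.1 + 1, st.2.1, st.2.2)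
        else if 0 < st.1 then
          (0, st.2.1 - 1, PySem.List.pySetD st.2.2 st.2.1 (PySem.Int.toStr st.1))
        else st)
      (0, size - 1, PySem.List.pyRepeat [" "] size)
  if 0 < st.1 then PySem.List.pySetD st.2.2 st.2.1 (PySem.Int.toStr st.1) else st.2.2

def bRow (n : Nat) (size : Int) (row : List String) : List String :=
  let rc :=
    (PySem.List.pyRange 0 (n : Int) 1).foldl
      (fun (rc : List String × Int) x =>
        if PySem.List.pyGetD row x "" = "*" then (rc.1, rc.2 + 1)
        else if rc.2 ≠ 0 then (rc.1 ++ [PySem.Int.toStr rc.2], 0)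
        else rc)
      ([], 0)
  let runs := if rc.2 ≠ 0 then rc.1 ++ [PySem.Int.toStr rc.2] else rc.1
  PySem.List.pyRepeat [" "] (size - PySem.List.len runs) ++ runs

lemma make_ans_col_eq_map (board : List (List String)) (size : Int) :
    make_ans_col board size
    = (PySem.List.pyRange 0 (board.length : Int) 1).map
        (fun y => aRow board.length size (PySem.List.pyGetD board y [])) := by
  have h1 : make_ans_col board size
      = (PySem.List.pyRange 0 (board.length : Int) 1).foldl
          (fun a y => PySem.List.pySetD a y
            ((fun (y : Int) (r : List String) =>
              let st :=
                (PySem.List.pyRange ((board.length : Int) - 1) (-1) (-1)).foldl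
                  (fun (st : Int × Int × List String) x =>
                    if PySem.List.pyGetD (PySem.List.pyGetD board y []) x "" = "*" then
                      (st.1 + 1, st.2.1, st.2.2)
                    else if 0 < st.1 then
                      (0, st.2.1 - 1, PySem.List.pySetD st.2.2 st.2.1 (PySem.Int.toStr st.1))
                    else st)
                  (0, size - 1, r)
              if 0 < st.1 then PySem.List.pySetD st.2.2 st.2.1 (PySem.Int.toStr st.1) else st.2.2)
             y (PySem.List.pyGetD a y [])))
          ((PySem.List.pyRange 0 (board.length : Int) 1).map
            (fun _ => PySem.List.pyRepeat [" "] size)) := rfl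
  have h2 := foldA_set
    (fun (y : Int) (r : List String) =>
      let st :=
        (PySem.List.pyRange ((board.length : Int) - 1) (-1) (-1)).foldl
          (fun (st : Int × Int × List String) x =>
            if PySem.List.pyGetD (PySem.List.pyGetD board y []) x "" = "*" then
              (st.1 + 1, st.2.1, st.2.2)
            else if 0 < st.1 then
              (0, st.2.1 - 1, PySem.List.pySetD st.2.2 st.2.1 (PySem.Int.toStr st.1))
            else st)
          (0, size - 1, r)
      if 0 < st.1 then PySem.List.pySetD st.2.2 st.2.1 (PySem.Int.toStr st.1) else st.2.2)
    [] board.length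
    ((PySem.List.pyRange 0 (board.length : Int) 1).map (fun _ => PySem.List.pyRepeat [" "] size))
    (by simp [PySem.List.length_pyRange_one])
  rw [h1, h2]
  rw [List.drop_eq_nil_of_le (by simp [PySem.List.length_pyRange_one])]
  rw [List.append_nil]
  apply List.map_congr_left
  intro y hy
  have hy' := PySem.List.mem_pyRange_one.mp hy
  rw [PySem.List.pyGetD_map_pyRange_of_nonneg _ _ _ _ hy'.1 hy'.2]
  rfl

lemma make_ans_col_alt_eq_map (board : List (List String)) (size : Int) :
    make_ans_col_alt board size
    = (PySem.List.pyRange 0 (board.length : Int) 1).map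
        (fun y => bRow board.length size (PySem.List.pyGetD board y [])) := by
  have h1 : make_ans_col_alt board size
      = (PySem.List.pyRange 0 (board.length : Int) 1).foldl
          (fun a y => a ++ [bRow board.length size (PySem.List.pyGetD board y [])]) [] := rfl
  rw [h1, PySem.List.foldl_append_singleton_eq_map
        (fun y => bRow board.length size (PySem.List.pyGetD board y []))]
  simp

lemma runsAux_reverse (c : List String) :
    runsAux c.reverse 0 = (runsAux c 0).reverse := by
  simpa using runsAux_reverse_aux c 0

lemma aRow_reduce (n : Nat) (size : Int) (row : List String) (hn : n ≤ row.length) :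
    aRow n size row
    = placeRuns ((runsAux (row.take n) 0).reverse) (size - 1) (List.replicate size.toNat " ") := by
  have hcl : (row.take n).length = n := by rw [List.length_take]; omega
  have h1 : aRow n size row
      = aFlush ((PySem.List.pyRange ((n : Int) - 1) (-1) (-1)).foldl
          (fun st x => aStep st (PySem.List.pyGetD row x ""))
          (0, size - 1, PySem.List.pyRepeat [" "] size)) := rfl
  rw [h1, PySem.List.pyRange_neg_one_eq_reverse, show (-1 : Int) + 1 = 0 by ring,
      show ((n : Int) - 1) + 1 = (n : Int) by ring]
  rw [PySem.List.foldl_congr_mem _ _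
        (fun st x => aStep st (PySem.List.pyGetD (row.take n) x "")) _
        (by
          intro acc x hx
          have hx' := PySem.List.mem_pyRange_one.mp (List.mem_reverse.mp hx)
          rw [pyGetD_take row n hn x hx'.1 hx'.2])]
  rw [← List.foldl_map (f := fun x => PySem.List.pyGetD (row.take n) x "") (g := aStep)]
  rw [List.map_reverse]
  rw [show ((n : Int)) = ((row.take n).length : Int) by rw [hcl]]
  rw [PySem.List.map_pyGetD_pyRange_zero']
  rw [aFold_eq, runsAux_reverse, PySem.List.pyRepeat_singleton]

lemma bRow_reduce (n : Nat) (size : Int) (row : List String) (hn : n ≤ row.length) :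
    bRow n size row
    = List.replicate (size - ((runsAux (row.take n) 0).length : Int)).toNat " "
      ++ (runsAux (row.take n) 0).map PySem.Int.toStr := by
  have hcl : (row.take n).length = n := by rw [List.length_take]; omega
  have h1 : bRow n size row
      = (let runs := bFlush ((PySem.List.pyRange 0 (n : Int) 1).foldl
            (fun rc x => bStep rc (PySem.List.pyGetD row x "")) ([], 0));
         PySem.List.pyRepeat [" "] (size - PySem.List.len runs) ++ runs) := rfl
  rw [h1]
  rw [PySem.List.foldl_congr_mem _ _
        (fun rc x => bStep rc (PySem.List.pyGetD (row.take n) x "")) _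
        (by
          intro acc x hx
          have hx' := PySem.List.mem_pyRange_one.mp hx
          rw [pyGetD_take row n hn x hx'.1 hx'.2])]
  rw [← List.foldl_map (f := fun x => PySem.List.pyGetD (row.take n) x "") (g := bStep)]
  rw [show ((n : Int)) = ((row.take n).length : Int) by rw [hcl]]
  rw [PySem.List.map_pyGetD_pyRange_zero']
  rw [bFold_eq _ _ _ (by omega)]
  simp [PySem.List.len_eq, PySem.List.pyRepeat_singleton]

lemma runsAux_length_nruns (c : List String) : (runsAux c 0).length = pvNRuns c := by
  have h := runsAux_length_nruns_aux c "" 0 (le_refl 0) (by simp)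
  simpa [pvNRuns] using h

lemma row_eq (n : Nat) (size : Int) (row : List String) (hn : n ≤ row.length)
    (hk : 0 < pvNRuns (row.take n) → (pvNRuns (row.take n) : Int) ≤ size) :
    aRow n size row = bRow n size row := by
  rw [aRow_reduce n size row hn, bRow_reduce n size row hn]
  have hK : (runsAux (row.take n) 0).length = pvNRuns (row.take n) :=
    runsAux_length_nruns (row.take n)
  by_cases h0 : (runsAux (row.take n) 0).length = 0
  · rw [List.length_eq_zero_iff.mp h0]
    simp [placeRuns]
  · have hpos : 0 < pvNRuns (row.take n) := by omega
    have hle : (pvNRuns (row.take n) : Int) ≤ size := hk hpos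
    have hle' : ((runsAux (row.take n) 0).length : Int) ≤ size := by rw [hK]; exact_mod_cast hle
    have hsz : 0 < size := by omega
    have hlen : ((runsAux (row.take n) 0).reverse).length
        ≤ (List.replicate size.toNat (" " : String)).length := by
      rw [List.length_reverse, List.length_replicate]; omega
    have h := placeRuns_eq ((runsAux (row.take n) 0).reverse)
      (List.replicate size.toNat " ") [] hlen
    simp only [List.length_replicate, List.length_reverse, List.append_nil,
      List.reverse_reverse, List.take_replicate] at h
    rw [show size - 1 = ((size.toNat : Nat) : Int) - 1 by omega, h]
    rw [show min (size.toNat - (runsAux (row.take n) 0).length) size.toNat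
        = (size - ((runsAux (row.take n) 0).length : Int)).toNat by omega]

lemma main_eq (board : List (List String)) (size : Int)
    (hpre1 : ∀ row ∈ board, board.length ≤ row.length)
    (hpre2 : ∀ row ∈ board, pvNRuns (row.take board.length) = 0
             ∨ (pvNRuns (row.take board.length) : Int) ≤ size) :
    make_ans_col board size = make_ans_col_alt board size := by
  rw [make_ans_col_eq_map, make_ans_col_alt_eq_map]
  apply List.map_congr_left
  intro y hy
  have hy' := PySem.List.mem_pyRange_one.mp hy
  have hmem : PySem.List.pyGetD board y [] ∈ board :=
    PySem.List.pyGetD_mem board [] (by simp [PySem.Raise.InRange]; omega)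
  apply row_eq board.length size _ (hpre1 _ hmem)
  intro hpos
  rcases hpre2 _ hmem with h | h
  · omega
  · exact h

-- ===== VERDICT (by name: the statement is the Claim_ definition above) =====
theorem make_ans_col_spec : Claim_equal_make_ans_col := by
  intro board size _ hpre
  exact main_eq board size hpre.1 hpre.2
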